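-- pv_equiv track=rewrite | github.com/techjoec/DriftBuster | src/driftbuster/core/detector.py | _normalise_reason_token
-- ===== SOURCE A (Python) =====
-- def _titleise_component(component: str) -> str:
--     if not component:
--         return component
--     for index, char in enumerate(component):
--         if char.isalpha():
--             break
--     else:
--         return component
--     prefix = component[:index]
--     alpha = component[index].upper()
--     suffix = component[index + 1:]
--     return f"{prefix}{alpha}{suffix}"
--
-- def _normalise_reason_token(token: str) -> str:
--     parts = token.split("-")
--     normalised_parts = []
--     for part in parts:
--         subparts = part.split(":")
--         normalised_subparts = [_titleise_component(sub) for sub in subparts]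
--         normalised_parts.append(":".join(normalised_subparts))
--     return "-".join(normalised_parts)
-- ===== SOURCE B (Python) =====
-- def _normalise_reason_token(token: str) -> str:
--     out = []
--     done = False
--     for ch in token:
--         if ch == "-" or ch == ":":
--             out.append(ch)
--             done = False
--         elif not done and ch.isalpha():
--             out.append(ch.upper())
--             done = True
--         else:
--             out.append(ch)
--     return "".join(out)
-- ===== Notes on version B (the rewrite author's own statement) =====
-- stated objective: simpler
-- what changed: Replaced the nested hyphen-split/colon-split/per-component first-alpha scan/join pipeline by one left-to-right pass over the characters with a component-already-capitalised flag that resets at each delimiter.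
import Mathlib
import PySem

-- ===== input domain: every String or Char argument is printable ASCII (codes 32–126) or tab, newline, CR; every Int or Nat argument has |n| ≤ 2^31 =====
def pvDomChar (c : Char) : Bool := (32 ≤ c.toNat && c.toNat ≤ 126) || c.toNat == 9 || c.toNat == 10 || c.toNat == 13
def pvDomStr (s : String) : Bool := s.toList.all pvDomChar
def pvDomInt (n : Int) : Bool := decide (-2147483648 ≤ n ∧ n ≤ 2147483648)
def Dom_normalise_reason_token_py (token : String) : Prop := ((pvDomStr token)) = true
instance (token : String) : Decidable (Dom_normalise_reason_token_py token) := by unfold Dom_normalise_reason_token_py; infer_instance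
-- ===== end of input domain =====

-- B replaces the nested split/titleise/join pipeline by one pass with a per-component
-- 'already capitalised' flag; objective: simpler.

-- ===== PORT A =====
-- the 'for index, char in enumerate(component): if char.isalpha(): break / else: return ...' loop:
-- first index whose char is alphabetic, none if the loop falls through
def findAlphaIdx : List Char → Option Nat
  | [] => none
  | c :: rest => if PySem.Chars.isalpha c then some 0 else (findAlphaIdx rest).map (· + 1)

def titleiseA (component : List Char) : List Char :=
  if component.isEmpty then component
  else
    match findAlphaIdx component with
    | none => component
    | some index =>
      let prefixPart := PySem.List.slice component none (some (index : Int))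
      let alpha := PySem.Chars.upperChar ((PySem.List.pyGet? component (index : Int)).getD ' ')
      let suffix := PySem.List.slice component (some ((index : Int) + 1)) none
      prefixPart ++ [alpha] ++ suffix

def normalise_reason_token_py (token : String) : String :=
  let parts := PySem.Chars.splitOn token.toList ['-']
  let normalised_parts := parts.map (fun part =>
    let subparts := PySem.Chars.splitOn part [':']
    PySem.Chars.join [':'] (subparts.map titleiseA))
  String.ofList (PySem.Chars.join ['-'] normalised_parts)

-- ===== PORT B =====
-- single pass; `done` = the current component already had its first alphabetic letter capitalised
def scanB : List Char → Bool → List Char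
  | [], _ => []
  | c :: rest, done =>
    if c == '-' || c == ':' then c :: scanB rest false
    else if !done && PySem.Chars.isalpha c then PySem.Chars.upperChar c :: scanB rest true
    else c :: scanB rest done

def normalise_reason_token_py_alt (token : String) : String :=
  String.ofList (scanB token.toList false)

-- ===== PRECONDITION & SPEC =====
def Spec_normalise_reason_token_py (token : String) (out : String) : Prop := out = normalise_reason_token_py_alt token
instance (token : String) (out : String) : Decidable (Spec_normalise_reason_token_py token out) := by unfold Spec_normalise_reason_token_py; infer_instance

-- ===== CLAIM (what is proved, stated in full; the proofs are below) =====
def Claim_equal_normalise_reason_token_py : Prop := ∀ (token : String), Dom_normalise_reason_token_py token → Spec_normalise_reason_token_py token (normalise_reason_token_py token)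

-- ===== LEMMAS AND PROOFS =====

-- simple structural model of str.split(<single char>)
def splitOneChar (d : Char) : List Char → List (List Char)
  | [] => [[]]
  | c :: rest =>
    if c == d then [] :: splitOneChar d rest
    else
      match splitOneChar d rest with
      | [] => [[c]]
      | x :: xs => (c :: x) :: xs

def consH (p : List Char) : List (List Char) → List (List Char)
  | [] => [p]
  | x :: xs => (p ++ x) :: xs

lemma splitOneChar_ne_nil (d : Char) (l : List Char) : splitOneChar d l ≠ [] := by
  cases l with
  | nil => simp [splitOneChar]
  | cons c rest =>
    simp only [splitOneChar]
    split
    · simp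
    · split <;> simp

lemma consH_nil_of_ne (S : List (List Char)) (h : S ≠ []) : consH [] S = S := by
  cases S with
  | nil => exact absurd rfl h
  | cons x xs => simp [consH]

lemma go_spec (d : Char) (fuel : Nat) : ∀ (l cur : List Char) (acc : List (List Char)),
    l.length ≤ fuel →
    PySem.Chars.splitOn.go [d] fuel l cur acc = acc.reverse ++ consH cur.reverse (splitOneChar d l) := by
  induction fuel with
  | zero =>
    intro l cur acc h
    have : l = [] := List.eq_nil_of_length_eq_zero (Nat.le_zero.mp h)
    subst this
    rw [PySem.Chars.splitOn.go.eq_def]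
    simp [splitOneChar, consH]
  | succ fuel ih =>
    intro l cur acc h
    cases l with
    | nil =>
      rw [PySem.Chars.splitOn.go.eq_def]
      simp [splitOneChar, consH]
    | cons c rest =>
      rw [PySem.Chars.splitOn.go.eq_def]
      simp only []
      by_cases hc : c = d
      · subst hc
        have hpre : [c].isPrefixOf (c :: rest) = true := by simp [List.isPrefixOf]
        rw [if_pos hpre]
        simp only [List.length_cons, List.length_nil, List.drop_succ_cons, List.drop_zero]
        rw [ih rest [] (cur.reverse :: acc) (by simpa using Nat.le_of_succ_le_succ h)]
        have hS := splitOneChar_ne_nil c rest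
        cases hSe : splitOneChar c rest with
        | nil => exact absurd hSe hS
        | cons x xs => simp [splitOneChar, hSe, consH]
      · have hpre : [d].isPrefixOf (c :: rest) = false := by
          simp [List.isPrefixOf]
          intro h'; exact absurd h'.symm hc
        rw [if_neg (by simp [hpre])]
        rw [ih rest (c :: cur) acc (by simpa using Nat.le_of_succ_le_succ h)]
        have hS := splitOneChar_ne_nil d rest
        cases hSe : splitOneChar d rest with
        | nil => exact absurd hSe hS
        | cons x xs =>
          simp [splitOneChar, hc, hSe, consH]

lemma splitOn_single (d : Char) (l : List Char) :
    PySem.Chars.splitOn l [d] = splitOneChar d l := by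
  unfold PySem.Chars.splitOn
  rw [go_spec d (l.length + 1) l [] [] (Nat.le_succ _)]
  simp [consH_nil_of_ne _ (splitOneChar_ne_nil d l)]

-- join with a one-char separator: cons laws
lemma join_cons_head (sep : List Char) (a : Char) (x : List Char) (xs : List (List Char)) :
    PySem.Chars.join sep ((a :: x) :: xs) = a :: PySem.Chars.join sep (x :: xs) := by
  cases xs <;> simp [PySem.Chars.join, List.intercalate, List.intersperse]

lemma join_nil_head (d : Char) (x : List Char) (xs : List (List Char)) :
    PySem.Chars.join [d] ([] :: x :: xs) = d :: PySem.Chars.join [d] (x :: xs) := by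
  cases xs <;> simp [PySem.Chars.join, List.intercalate, List.intersperse]

-- titleiseA computation laws
lemma findAlphaIdx_lt {q : List Char} {i : Nat} (h : findAlphaIdx q = some i) : i < q.length := by
  induction q generalizing i with
  | nil => simp [findAlphaIdx] at h
  | cons c rest ih =>
    simp only [findAlphaIdx] at h
    split at h
    · simp at h; simp [← h]
    · cases hr : findAlphaIdx rest with
      | none => rw [hr] at h; simp at h
      | some j =>
        rw [hr] at h; simp at h
        have := ih hr
        simp; omega

lemma titleiseA_of_some {q : List Char} {i : Nat} (h : findAlphaIdx q = some i) :
    titleiseA q = q.take i ++ [PySem.Chars.upperChar (q.getD i ' ')] ++ q.drop (i + 1) := by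
  have hlt := findAlphaIdx_lt h
  have hne : q ≠ [] := by intro he; subst he; simp at hlt
  unfold titleiseA
  rw [if_neg (by simpa using hne), h]
  simp only [PySem.List.slice_to (b := (i : Int)) q (by positivity)]
  have h1 : ((i : Int) + 1) = ((i + 1 : Nat) : Int) := by push_cast; ring
  rw [h1, PySem.List.slice_from q (by positivity), PySem.List.pyGet?_natCast]
  simp [List.getElem?_eq_getElem hlt]

lemma titleiseA_alpha_cons {c : Char} (q : List Char) (h : PySem.Chars.isalpha c = true) :
    titleiseA (c :: q) = PySem.Chars.upperChar c :: q := by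
  have hf : findAlphaIdx (c :: q) = some 0 := by simp [findAlphaIdx, h]
  rw [titleiseA_of_some hf]
  simp

lemma titleiseA_notalpha_cons {c : Char} (q : List Char) (h : PySem.Chars.isalpha c = false) :
    titleiseA (c :: q) = c :: titleiseA q := by
  have hf : findAlphaIdx (c :: q) = (findAlphaIdx q).map (· + 1) := by
    simp [findAlphaIdx, h]
  cases hq : findAlphaIdx q with
  | none =>
    have : titleiseA (c :: q) = c :: q := by
      unfold titleiseA
      rw [if_neg (by simp), hf, hq]
      rfl
    rw [this]
    cases q with
    | nil => simp [titleiseA]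
    | cons a as => unfold titleiseA; rw [if_neg (by simp), hq]
  | some i =>
    have hfc : findAlphaIdx (c :: q) = some (i + 1) := by rw [hf, hq]; rfl
    rw [titleiseA_of_some hfc, titleiseA_of_some hq]
    simp

-- A's pipeline re-expressed over splitOneChar
def gA (p : List Char) : List Char :=
  PySem.Chars.join [':'] ((splitOneChar ':' p).map titleiseA)

def gA1 (p : List Char) : List Char :=
  match splitOneChar ':' p with
  | [] => []
  | q :: qs => PySem.Chars.join [':'] (q :: qs.map titleiseA)

def Ac (l : List Char) : List Char :=
  PySem.Chars.join ['-'] ((splitOneChar '-' l).map gA)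

def A1c (l : List Char) : List Char :=
  match splitOneChar '-' l with
  | [] => []
  | p :: ps => PySem.Chars.join ['-'] (gA1 p :: ps.map gA)

lemma main_ind (l : List Char) : Ac l = scanB l false ∧ A1c l = scanB l true := by
  induction l with
  | nil => constructor <;> rfl
  | cons c rest ih =>
    obtain ⟨ih0, ih1⟩ := ih
    obtain ⟨p, ps, hS⟩ : ∃ p ps, splitOneChar '-' rest = p :: ps := by
      cases hS : splitOneChar '-' rest with
      | nil => exact absurd hS (splitOneChar_ne_nil _ _)
      | cons p ps => exact ⟨p, ps, rfl⟩
    by_cases hdash : c = '-'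
    · subst hdash
      have hAc : Ac ('-' :: rest) = '-' :: Ac rest := by
        unfold Ac
        simp only [splitOneChar, beq_self_eq_true, if_true, List.map, hS]
        have : gA [] = [] := rfl
        rw [this, join_nil_head]
      have hA1c : A1c ('-' :: rest) = '-' :: Ac rest := by
        unfold A1c Ac
        simp only [splitOneChar, beq_self_eq_true, if_true, hS, List.map]
        have : gA1 [] = [] := rfl
        rw [this, join_nil_head]
      refine ⟨?_, ?_⟩ <;> simp [scanB, hAc, hA1c, ih0]
    · obtain ⟨q, qs, hQ⟩ : ∃ q qs, splitOneChar ':' p = q :: qs := by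
        cases hQ : splitOneChar ':' p with
        | nil => exact absurd hQ (splitOneChar_ne_nil _ _)
        | cons q qs => exact ⟨q, qs, rfl⟩
      have hSc : splitOneChar '-' (c :: rest) = (c :: p) :: ps := by
        simp [splitOneChar, hdash, hS]
      by_cases hcolon : c = ':'
      · subst hcolon
        have hgA : gA (':' :: p) = ':' :: gA p := by
          unfold gA
          simp only [splitOneChar, beq_self_eq_true, if_true, hQ, List.map]
          have ht : titleiseA [] = [] := rfl
          rw [ht, join_nil_head]
        have hgA1 : gA1 (':' :: p) = ':' :: gA p := by
          unfold gA1 gA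
          simp only [splitOneChar, beq_self_eq_true, if_true, hQ, List.map]
          show PySem.Chars.join [':'] ([] :: (titleiseA q :: qs.map titleiseA)) = _
          rw [join_nil_head]
        have hAc : Ac (':' :: rest) = ':' :: Ac rest := by
          unfold Ac
          rw [hSc, hS]
          simp only [List.map, hgA]
          rw [join_cons_head]
        have hA1c : A1c (':' :: rest) = ':' :: Ac rest := by
          unfold A1c Ac
          rw [hSc, hS]
          show PySem.Chars.join ['-'] (gA1 (':' :: p) :: ps.map gA) = _
          rw [hgA1, join_cons_head]
          simp
        refine ⟨?_, ?_⟩ <;> simp [scanB, hAc, hA1c, ih0]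
      · have hQc : splitOneChar ':' (c :: p) = (c :: q) :: qs := by
          simp [splitOneChar, hcolon, hQ]
        have hgA1c : gA1 (c :: p) = c :: gA1 p := by
          unfold gA1
          rw [hQc, hQ]
          show PySem.Chars.join [':'] ((c :: q) :: qs.map titleiseA) = c :: PySem.Chars.join [':'] (q :: qs.map titleiseA)
          rw [join_cons_head]
        have hA1cc : A1c (c :: rest) = c :: A1c rest := by
          unfold A1c
          rw [hSc, hS]
          show PySem.Chars.join ['-'] (gA1 (c :: p) :: ps.map gA) = c :: PySem.Chars.join ['-'] (gA1 p :: ps.map gA)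
          rw [hgA1c, join_cons_head]
        by_cases halpha : PySem.Chars.isalpha c = true
        · have hgAc : gA (c :: p) = PySem.Chars.upperChar c :: gA1 p := by
            unfold gA gA1
            rw [hQc, hQ]
            show PySem.Chars.join [':'] (titleiseA (c :: q) :: qs.map titleiseA) = _ :: PySem.Chars.join [':'] (q :: qs.map titleiseA)
            rw [titleiseA_alpha_cons q halpha, join_cons_head]
          have hAcc : Ac (c :: rest) = PySem.Chars.upperChar c :: A1c rest := by
            unfold Ac A1c
            rw [hSc, hS]
            simp only [List.map, hgAc]
            rw [join_cons_head]
          refine ⟨?_, ?_⟩ <;>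
            simp [scanB, hdash, hcolon, halpha, hAcc, hA1cc, ih1]
        · have hna : PySem.Chars.isalpha c = false := by simpa using halpha
          have hgAc : gA (c :: p) = c :: gA p := by
            unfold gA
            rw [hQc, hQ]
            simp only [List.map, titleiseA_notalpha_cons q hna]
            rw [join_cons_head]
          have hAcc : Ac (c :: rest) = c :: Ac rest := by
            unfold Ac
            rw [hSc, hS]
            simp only [List.map, hgAc]
            rw [join_cons_head]
          refine ⟨?_, ?_⟩ <;>
            simp [scanB, hdash, hcolon, hna, hAcc, hA1cc, ih0, ih1]

-- ===== VERDICT (by name: the statement is the Claim_ definition above) =====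
theorem normalise_reason_token_py_spec : Claim_equal_normalise_reason_token_py := by
  intro token _
  unfold Spec_normalise_reason_token_py normalise_reason_token_py normalise_reason_token_py_alt
  have h1 : PySem.Chars.splitOn token.toList ['-'] = splitOneChar '-' token.toList :=
    splitOn_single '-' token.toList
  have h2 : ∀ part, PySem.Chars.splitOn part [':'] = splitOneChar ':' part :=
    fun part => splitOn_single ':' part
  simp only [h1, h2]
  have := (main_ind token.toList).1
  unfold Ac gA at this
  rw [this]
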